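-- pv_equiv track=rewrite | github.com/shiraily/exercise | atcoder/beginners.py | otoshidama
-- ===== SOURCE A (Python) =====
-- def otoshidama(n, y):
--     if y // 10_000 > n:
--         return -1, -1, -1
--     for a in range(y // 10_000 + 1):
--         remain_money = y - (10_000 * a)
--         remain_bill = n - a
--         if remain_money // 5000 > remain_bill:
--             continue
--         for b in range(remain_bill + 1):
--             remain_money2 = remain_money - b * 5000
--             remain_bill2 = remain_bill - b
--             if remain_bill2 * 1000 == remain_money2:
--                 return [a, b, remain_bill2]
--     return [-1, -1, -1]
-- ===== SOURCE B (Python) =====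
-- def otoshidama(n, y):
--     # Iterate 10000-yen count only; the 5000-yen count is determined in closed form.
--     for a in range(y // 10_000 + 1):
--         t = (y - 10_000 * a) - 1000 * (n - a)
--         if n - a >= 0 and t >= 0 and t % 4000 == 0 and t // 4000 <= n - a:
--             b = t // 4000
--             return [a, b, n - a - b]
--     return [-1, -1, -1]
-- ===== Notes on version B (the rewrite author's own statement) =====
-- stated objective: faster
-- what changed: B drops A's nested scan over b: for each count a of 10000-yen bills, the 5000-yen count is computed in closed form as (remaining - 1000*remaining_bills)/4000 with an integrality/range check, removing the inner loop.
import Mathlib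
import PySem

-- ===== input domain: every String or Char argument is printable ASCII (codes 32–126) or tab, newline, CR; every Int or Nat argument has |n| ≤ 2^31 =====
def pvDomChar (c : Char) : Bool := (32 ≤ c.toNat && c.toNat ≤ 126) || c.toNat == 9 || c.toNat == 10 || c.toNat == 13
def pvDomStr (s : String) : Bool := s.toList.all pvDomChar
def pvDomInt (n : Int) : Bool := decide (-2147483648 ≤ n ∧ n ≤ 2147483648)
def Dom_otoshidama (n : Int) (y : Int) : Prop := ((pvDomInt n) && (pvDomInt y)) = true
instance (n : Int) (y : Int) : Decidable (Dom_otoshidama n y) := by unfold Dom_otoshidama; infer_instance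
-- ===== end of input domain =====

-- B removes A's inner scan over the 5000-yen count b: for each a it computes b in closed
-- form from the remaining money and bills and checks integrality/range (objective: faster, O(n^2) -> O(n)).
-- Where A returns the tuple (-1,-1,-1), both ports return the list [-1,-1,-1] (same values).

-- ===== PORT A =====
-- inner 'for b in range(remain_bill + 1)' loop with its early return
def pvAInner (a rm rb : Int) : List Int → Option (List Int)
  | [] => none
  | b :: bs =>
    let rm2 := rm - b * 5000
    let rb2 := rb - b
    if rb2 * 1000 = rm2 then some [a, b, rb2] else pvAInner a rm rb bs

-- outer 'for a in range(y // 10_000 + 1)' loop with 'continue' prune and early return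
def pvAOuter (n y : Int) : List Int → List Int
  | [] => [-1, -1, -1]
  | a :: as =>
    let rm := y - 10000 * a
    let rb := n - a
    if PySem.Int.floordiv rm 5000 > rb then pvAOuter n y as
    else
      match pvAInner a rm rb (PySem.List.pyRange 0 (rb + 1) 1) with
      | some r => r
      | none => pvAOuter n y as

def otoshidama (n : Int) (y : Int) : List Int :=
  if PySem.Int.floordiv y 10000 > n then [-1, -1, -1]  -- Python returns the tuple (-1,-1,-1) here
  else pvAOuter n y (PySem.List.pyRange 0 (PySem.Int.floordiv y 10000 + 1) 1)

-- ===== PORT B =====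
def pvBLoop (n y : Int) : List Int → List Int
  | [] => [-1, -1, -1]
  | a :: as =>
    let t := (y - 10000 * a) - 1000 * (n - a)
    if n - a ≥ 0 ∧ t ≥ 0 ∧ PySem.Int.mod t 4000 = 0 ∧ PySem.Int.floordiv t 4000 ≤ n - a then
      [a, PySem.Int.floordiv t 4000, n - a - PySem.Int.floordiv t 4000]
    else pvBLoop n y as

def otoshidama_alt (n : Int) (y : Int) : List Int :=
  pvBLoop n y (PySem.List.pyRange 0 (PySem.Int.floordiv y 10000 + 1) 1)

-- ===== PRECONDITION & SPEC =====
def Spec_otoshidama (n : Int) (y : Int) (out : List Int) : Prop := out = otoshidama_alt n y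
instance (n : Int) (y : Int) (out : List Int) : Decidable (Spec_otoshidama n y out) := by unfold Spec_otoshidama; infer_instance

-- ===== CLAIM (what is proved, stated in full; the proofs are below) =====
def Claim_equal_otoshidama : Prop := ∀ (n : Int) (y : Int), Dom_otoshidama n y → Spec_otoshidama n y (otoshidama n y)

-- ===== LEMMAS AND PROOFS =====

-- If t = rm - 1000*rb is 4000*b0, the inner scan finds exactly b0 (the matching b is unique)
theorem pvAInner_char (a rm rb b0 : Int) (h : 4000 * b0 = rm - 1000 * rb) :
    ∀ bs : List Int, pvAInner a rm rb bs =
      if b0 ∈ bs then some [a, b0, rb - b0] else none := by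
  intro bs
  induction bs with
  | nil => simp [pvAInner]
  | cons b bs ih =>
    by_cases hb : b = b0
    · subst hb
      have : (rb - b) * 1000 = rm - b * 5000 := by omega
      simp [pvAInner, this]
    · have : ¬ ((rb - b) * 1000 = rm - b * 5000) := by omega
      have hne : ¬ (b0 = b) := fun e => hb e.symm
      simp [pvAInner, this, ih, hne]

-- If 4000 does not divide rm - 1000*rb, the inner scan finds nothing
theorem pvAInner_none (a rm rb : Int) (h : ∀ b : Int, 4000 * b ≠ rm - 1000 * rb) :
    ∀ bs : List Int, pvAInner a rm rb bs = none := by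
  intro bs
  induction bs with
  | nil => rfl
  | cons b bs ih =>
    have : ¬ ((rb - b) * 1000 = rm - b * 5000) := by
      intro hc; exact h b (by omega)
    simp [pvAInner, this, ih]

-- exact multiple: floordiv recovers the factor
theorem pvFd4000 (t : Int) (h : PySem.Int.mod t 4000 = 0) :
    4000 * PySem.Int.floordiv t 4000 = t := by
  have := PySem.Int.floordiv_mul_add_mod t 4000
  omega

-- the two loop bodies agree step by step over any list of candidate a's
theorem pvLoop_eq (n y : Int) : ∀ L : List Int, pvAOuter n y L = pvBLoop n y L := by
  intro L
  induction L with
  | nil => rfl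
  | cons a as ih =>
    show pvAOuter n y (a :: as) = pvBLoop n y (a :: as)
    simp only [pvAOuter, pvBLoop]
    set rm := y - 10000 * a with hrm
    set rb := n - a with hrb
    set t := (y - 10000 * a) - 1000 * (n - a) with ht
    by_cases hc : rb ≥ 0 ∧ t ≥ 0 ∧ PySem.Int.mod t 4000 = 0 ∧ PySem.Int.floordiv t 4000 ≤ rb
    · obtain ⟨h1, h2, h3, h4⟩ := hc
      set b0 := PySem.Int.floordiv t 4000 with hb0
      have hmul : 4000 * b0 = t := pvFd4000 t h3
      have hb0nn : 0 ≤ b0 := by omega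
      have hprune : ¬ (PySem.Int.floordiv rm 5000 > rb) := by
        have : PySem.Int.floordiv rm 5000 < rb + 1 := by
          rw [PySem.Int.floordiv_lt_iff_lt_mul (by omega : (0:Int) < 5000)]
          omega
        omega
      have hmem : b0 ∈ PySem.List.pyRange 0 (rb + 1) 1 := by
        rw [PySem.List.mem_pyRange_one]; omega
      rw [if_neg hprune, pvAInner_char a rm rb b0 (by omega), if_pos hmem,
          if_pos ⟨h1, h2, h3, h4⟩]
    · rw [if_neg hc]
      by_cases hp : PySem.Int.floordiv rm 5000 > rb
      · rw [if_pos hp]; exact ih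
      · rw [if_neg hp]
        by_cases hd : ∃ b : Int, 4000 * b = t
        · obtain ⟨b0, hb0⟩ := hd
          have hmod : PySem.Int.mod t 4000 = 0 := by
            have h1 := PySem.Int.floordiv_mul_add_mod t 4000
            have h2 : PySem.Int.floordiv t 4000 = b0 := by
              rw [PySem.Int.floordiv_eq_iff_of_pos (by omega : (0:Int) < 4000)]
              omega
            omega
          have hfd : PySem.Int.floordiv t 4000 = b0 := by
            rw [PySem.Int.floordiv_eq_iff_of_pos (by omega : (0:Int) < 4000)]
            omega
          have hnot : ¬ (b0 ∈ PySem.List.pyRange 0 (rb + 1) 1) := by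
            rw [PySem.List.mem_pyRange_one]
            intro ⟨hl, hu⟩
            exact hc ⟨by omega, by omega, hmod, by omega⟩
          rw [pvAInner_char a rm rb b0 (by omega), if_neg hnot]
          exact ih
        · rw [not_exists] at hd
          rw [pvAInner_none a rm rb (by intro b; exact hd b)]
          exact ih

-- when y // 10000 > n there is no representation at all, so B's loop finds nothing
theorem pvBLoop_early (n y : Int) (h : PySem.Int.floordiv y 10000 > n) :
    ∀ L : List Int, pvBLoop n y L = [-1, -1, -1] := by
  intro L
  induction L with
  | nil => rfl
  | cons a as ih =>
    have hy : ¬ (y < (n + 1) * 10000) := by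
      intro hy
      have : PySem.Int.floordiv y 10000 < n + 1 := by
        rw [PySem.Int.floordiv_lt_iff_lt_mul (by omega : (0:Int) < 10000)]
        exact hy
      omega
    have hc : ¬ (n - a ≥ 0 ∧ (y - 10000 * a) - 1000 * (n - a) ≥ 0 ∧
        PySem.Int.mod ((y - 10000 * a) - 1000 * (n - a)) 4000 = 0 ∧
        PySem.Int.floordiv ((y - 10000 * a) - 1000 * (n - a)) 4000 ≤ n - a) := by
      intro ⟨h1, h2, h3, h4⟩
      have hmul := pvFd4000 _ h3
      exact hy (by omega)
    simp only [pvBLoop, if_neg hc]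
    exact ih

-- ===== VERDICT (by name: the statement is the Claim_ definition above) =====
theorem otoshidama_spec : Claim_equal_otoshidama := by
  intro n y _
  show otoshidama n y = otoshidama_alt n y
  unfold otoshidama otoshidama_alt
  by_cases h : PySem.Int.floordiv y 10000 > n
  · rw [if_pos h, pvBLoop_early n y h]
  · rw [if_neg h, pvLoop_eq]
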